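-- pv_equiv track=rewrite | github.com/maxtrussell/advent-of-code | 2020/24/main.py | flip_tile
-- ===== SOURCE A (Python) =====
-- def flip_tile(direction):
--     """
--     NOTE: Using the double cord system described here:
--     https://www.redblobgames.com/grids/hexagons/
--     """
--     x, y = 0, 0
--     for dir in direction:
--         if dir == 'e':
--             x +=2
--         elif dir == 'w':
--             x -=2
--         elif dir == 'ne':
--             x += 1
--             y += 1
--         elif dir == 'nw':
--             x -= 1
--             y += 1
--         elif dir == 'se':
--             x += 1
--             y -= 1
--         elif dir == 'sw':
--             x -= 1
--             y -= 1
--     return (x, y)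
-- ===== SOURCE B (Python) =====
-- VALID = {'e', 'w', 'ne', 'nw', 'se', 'sw'}
--
-- def flip_tile(direction):
--     # Decode the moves lexically instead of via a per-token delta table:
--     # after discarding unknown tokens, the first character says north/south
--     # (y axis) and the last character says east/west, with magnitude 2 for the
--     # pure 'e'/'w' moves (double-coordinate system) and 1 for the diagonals.
--     moves = [d for d in direction if d in VALID]
--     y = sum(1 for d in moves if d[0] == 'n') - sum(1 for d in moves if d[0] == 's')
--     x = sum((2 if len(d) == 1 else 1) * (1 if d[-1] == 'e' else -1) for d in moves)
--     return (x, y)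
-- ===== Notes on version B (the rewrite author's own statement) =====
-- stated objective: alternative
-- what changed: B discards the per-token delta table entirely: it filters to the six valid tokens and then decodes each coordinate lexically in staged passes - y from the count of tokens whose first character is 'n' minus those starting with 's', x from the last character (e/w sign) scaled by 2 for the length-1 tokens.
import Mathlib
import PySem

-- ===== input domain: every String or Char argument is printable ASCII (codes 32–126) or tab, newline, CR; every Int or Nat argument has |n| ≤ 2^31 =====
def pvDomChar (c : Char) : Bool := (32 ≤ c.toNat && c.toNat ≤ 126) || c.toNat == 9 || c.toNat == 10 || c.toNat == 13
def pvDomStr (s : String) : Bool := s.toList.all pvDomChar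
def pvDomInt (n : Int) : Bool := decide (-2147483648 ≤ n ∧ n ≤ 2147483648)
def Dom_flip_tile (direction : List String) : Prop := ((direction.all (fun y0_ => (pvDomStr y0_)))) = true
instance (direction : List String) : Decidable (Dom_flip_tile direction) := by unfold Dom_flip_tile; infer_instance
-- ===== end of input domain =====

-- B drops A's per-token delta table: it filters to the six valid tokens and decodes the
-- coordinates lexically in staged passes (first char gives y, last char and length give x) (alternative).


-- ===== PORT A =====
-- literal transliteration of A's loop: fold over the list with state (x, y),
-- branches in the same order as the Python if/elif chain
def flip_tile_step (st : Int × Int) (dir : String) : Int × Int :=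
  let (x, y) := st
  if dir = "e" then (x + 2, y)
  else if dir = "w" then (x - 2, y)
  else if dir = "ne" then (x + 1, y + 1)
  else if dir = "nw" then (x - 1, y + 1)
  else if dir = "se" then (x + 1, y - 1)
  else if dir = "sw" then (x - 1, y - 1)
  else (x, y)

def flip_tile (direction : List String) : Int × Int :=
  direction.foldl flip_tile_step (0, 0)

-- ===== PORT B =====
-- transliteration of B: filter to the six valid tokens (set membership), then
-- y = #(first char 'n') - #(first char 's'), and x summed from the last char's
-- e/w sign scaled by 2 for length-1 tokens (d[0] → pyGet? 0, d[-1] → pyGet? (-1))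
def pvValidTokens : List String := ["e", "w", "ne", "nw", "se", "sw"]

def flip_tile_alt (direction : List String) : Int × Int :=
  let moves := direction.filter (fun d => pvValidTokens.contains d)
  let y : Int :=
    ((moves.filter (fun d => PySem.Str.pyGet? d 0 == some 'n')).length : Int)
    - ((moves.filter (fun d => PySem.Str.pyGet? d 0 == some 's')).length : Int)
  let x : Int := (moves.map (fun d =>
      (if PySem.Str.len d = 1 then (2 : Int) else 1) *
      (if PySem.Str.pyGet? d (-1) == some 'e' then (1 : Int) else -1))).sum
  (x, y)

-- ===== PRECONDITION & SPEC =====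
def Spec_flip_tile (direction : List String) (out : Int × Int) : Prop := out = flip_tile_alt direction
instance (direction : List String) (out : Int × Int) : Decidable (Spec_flip_tile direction out) := by unfold Spec_flip_tile; infer_instance

-- ===== CLAIM (what is proved, stated in full; the proofs are below) =====
def Claim_equal_flip_tile : Prop := ∀ (direction : List String), Dom_flip_tile direction → Spec_flip_tile direction (flip_tile direction)

-- ===== LEMMAS AND PROOFS =====
theorem alt_nil : flip_tile_alt [] = (0, 0) := by decide

-- B's contribution is additive over cons: filters/maps/sums all decompose
theorem alt_cons (a : String) (l : List String) :
    flip_tile_alt (a :: l) =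
      ((flip_tile_alt [a]).1 + (flip_tile_alt l).1,
       (flip_tile_alt [a]).2 + (flip_tile_alt l).2) := by
  by_cases hv : a ∈ pvValidTokens
  · simp only [pvValidTokens, List.mem_cons, List.not_mem_nil, or_false] at hv
    rcases hv with rfl | rfl | rfl | rfl | rfl | rfl <;>
      simp [flip_tile_alt, pvValidTokens] <;> omega
  · simp [flip_tile_alt, hv]

-- B's contribution of each single valid token, by evaluation
theorem alt_e : flip_tile_alt ["e"] = (2, 0) := by decide
theorem alt_w : flip_tile_alt ["w"] = (-2, 0) := by decide
theorem alt_ne : flip_tile_alt ["ne"] = (1, 1) := by decide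
theorem alt_nw : flip_tile_alt ["nw"] = (-1, 1) := by decide
theorem alt_se : flip_tile_alt ["se"] = (1, -1) := by decide
theorem alt_sw : flip_tile_alt ["sw"] = (-1, -1) := by decide

-- an unknown token contributes nothing to B
theorem alt_invalid (a : String) (h : a ∉ pvValidTokens) :
    flip_tile_alt [a] = (0, 0) := by
  simp [flip_tile_alt, h]

-- one step of A's loop adds exactly B's contribution of that token
theorem step_eq (x y : Int) (a : String) :
    flip_tile_step (x, y) a = (x + (flip_tile_alt [a]).1, y + (flip_tile_alt [a]).2) := by
  by_cases h1 : a = "e"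
  · subst h1; rw [alt_e]; simp [flip_tile_step]
  by_cases h2 : a = "w"
  · subst h2; rw [alt_w]; simp [flip_tile_step]; omega
  by_cases h3 : a = "ne"
  · subst h3; rw [alt_ne]; simp [flip_tile_step]
  by_cases h4 : a = "nw"
  · subst h4; rw [alt_nw]; simp [flip_tile_step]; omega
  by_cases h5 : a = "se"
  · subst h5; rw [alt_se]; simp [flip_tile_step]; omega
  by_cases h6 : a = "sw"
  · subst h6; rw [alt_sw]; simp [flip_tile_step]; omega
  have hv : a ∉ pvValidTokens := by simp [pvValidTokens, h1, h2, h3, h4, h5, h6]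
  rw [alt_invalid a hv]
  simp [flip_tile_step, h1, h2, h3, h4, h5, h6]

-- loop invariant: A's fold adds B's value to the initial state
theorem flip_tile_foldl (l : List String) (x y : Int) :
    l.foldl flip_tile_step (x, y) =
      (x + (flip_tile_alt l).1, y + (flip_tile_alt l).2) := by
  induction l generalizing x y with
  | nil => rw [alt_nil]; simp
  | cons a l ih =>
    rw [List.foldl_cons, step_eq, ih, alt_cons a l]
    simp [add_assoc]

-- ===== VERDICT (by name: the statement is the Claim_ definition above) =====
theorem flip_tile_spec : Claim_equal_flip_tile := by
  intro direction _
  unfold Spec_flip_tile flip_tile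
  rw [flip_tile_foldl]
  simp
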